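-- pv_equiv track=rewrite | github.com/lbormann/darts-caller | darts-caller.py | filter_most_recent_versions
-- ===== SOURCE A (Python) =====
-- def filter_most_recent_versions(voices):
--     max_versions = {}
--     for voice, data in voices:
--         parts = voice.split('-')
--         key = '-'.join(parts[:-1]) if parts[-1].startswith('v') else voice
--         version = int(parts[-1][1:]) if parts[-1].startswith('v') else 0
--         if key not in max_versions or version > max_versions[key][0]:
--             max_versions[key] = (version, data)
--
--     filtered_voices = []
--     for voice, data in voices:
--         parts = voice.split('-')
--         key = '-'.join(parts[:-1]) if parts[-1].startswith('v') else voice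
--         version = int(parts[-1][1:]) if parts[-1].startswith('v') else 0
--         if version == max_versions[key][0]:
--             filtered_voices.append((voice, data))
--
--     return filtered_voices
-- ===== SOURCE B (Python) =====
-- def filter_most_recent_versions(voices):
--     # Group entries by base name in one pass, keep each group's max-version members,
--     # then restore original input order by sorting on the recorded index.
--     groups = {}
--     for i, (voice, data) in enumerate(voices):
--         parts = voice.split('-')
--         key = '-'.join(parts[:-1]) if parts[-1].startswith('v') else voice
--         version = int(parts[-1][1:]) if parts[-1].startswith('v') else 0
--         groups.setdefault(key, []).append((i, version, voice, data))
--     results = []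
--     for members in groups.values():
--         m = max([t[1] for t in members])
--         results.extend([t for t in members if t[1] == m])
--     results.sort(key=lambda t: t[0])
--     return [(voice, data) for _, _, voice, data in results]
-- ===== Notes on version B (the rewrite author's own statement) =====
-- stated objective: alternative
-- what changed: B groups the voices by base name in one pass (dict of (index, version, voice, data) lists), takes each group's max version and its matching members, and restores input order by sorting on the recorded index, instead of A's running-max dict followed by a second full rescan of the list.
import Mathlib
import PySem

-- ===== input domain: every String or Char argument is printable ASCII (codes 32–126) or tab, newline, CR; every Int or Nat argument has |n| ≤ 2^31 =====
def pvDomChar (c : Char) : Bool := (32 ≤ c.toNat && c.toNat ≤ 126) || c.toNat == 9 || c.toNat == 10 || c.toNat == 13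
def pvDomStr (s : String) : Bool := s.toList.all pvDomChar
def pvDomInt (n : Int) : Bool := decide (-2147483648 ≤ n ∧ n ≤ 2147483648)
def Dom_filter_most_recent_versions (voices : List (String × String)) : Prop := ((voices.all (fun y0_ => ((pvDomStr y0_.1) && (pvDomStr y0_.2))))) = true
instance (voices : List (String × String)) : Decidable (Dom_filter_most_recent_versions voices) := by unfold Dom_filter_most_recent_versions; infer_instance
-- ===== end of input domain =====

-- B regroups the voices by base name in one pass and keeps each group's max-version members,
-- restoring input order by an index sort, instead of A's running-max dict plus a second full rescan.

-- ===== PORT A =====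
-- the per-voice parse step both Pythons perform verbatim:
--   parts = voice.split('-')
--   key = '-'.join(parts[:-1]) if parts[-1].startswith('v') else voice
--   version = int(parts[-1][1:]) if parts[-1].startswith('v') else 0
-- int() is PySem.Int.ofStr?; its none case (Python ValueError) is excluded by Pre_, so .getD 0 is never read.
def pvParse (voice : String) : String × Int :=
  let parts := (PySem.Str.split? voice "-").getD []
  let last := PySem.List.pyGetD parts (-1) ""
  if PySem.Str.startswith last "v" then
    (PySem.Str.join "-" (PySem.List.slice parts none (some (-1))),
     (PySem.Int.ofStr? (PySem.Str.slice last (some 1) none)).getD 0)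
  else (voice, 0)

-- A's first loop (the running-max dict), body step for step
def pvBuildA (voices : List (String × String)) : PySem.Dict String (Int × String) :=
  voices.foldl (fun d p =>
    if d.contains (pvParse p.1).1 = false then d.insert (pvParse p.1).1 ((pvParse p.1).2, p.2)
    else if (pvParse p.1).2 > (d.getD (pvParse p.1).1 (0, "")).1 then
      d.insert (pvParse p.1).1 ((pvParse p.1).2, p.2)
    else d) PySem.Dict.empty

def filter_most_recent_versions (voices : List (String × String)) : List (String × String) :=
  let max_versions := pvBuildA voices
  voices.foldl (fun acc p =>
    if (pvParse p.1).2 == (max_versions.getD (pvParse p.1).1 (0, "")).1 then acc ++ [p]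
    else acc) []

-- ===== PORT B =====
-- one grouped entry: (key, (original index, version, voice, data))
def pvEntry (e : Int × String × String) : String × Int × Int × String × String :=
  ((pvParse e.2.1).1, e.1, (pvParse e.2.1).2, e.2.1, e.2.2)

-- B's grouping loop: groups.setdefault(key, []).append((i, version, voice, data))
def pvGroups (voices : List (String × String)) : PySem.Dict String (List (Int × Int × String × String)) :=
  (PySem.List.enumerate voices).foldl
    (fun d e => d.modify (pvEntry e).1 [] (· ++ [(pvEntry e).2])) PySem.Dict.empty

def filter_most_recent_versions_alt (voices : List (String × String)) : List (String × String) :=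
  let groups := pvGroups voices
  let results := groups.values.foldl (fun acc members =>
    acc ++ (match PySem.List.max? (members.map (fun t => t.2.1)) (fun v => v) with
            | some m => members.filter (fun t => t.2.1 == m)
            | none => [])) []   -- none is Python's max([]) ValueError; groups' members lists are never empty
  (PySem.List.sorted results (fun t => t.1)).map (fun t => t.2.2)

-- ===== PRECONDITION & SPEC =====
def pvParseOk (voice : String) : Bool :=
  let parts := (PySem.Str.split? voice "-").getD []
  let last := PySem.List.pyGetD parts (-1) ""
  !(PySem.Str.startswith last "v") || (PySem.Int.ofStr? (PySem.Str.slice last (some 1) none)).isSome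

-- Pre_ excludes exactly the inputs where Python A raises ValueError (int(parts[-1][1:]) on a
-- non-integer tail such as "emma-v"); B raises the same error there.
def Pre_filter_most_recent_versions (voices : List (String × String)) : Prop :=
  ∀ p ∈ voices, pvParseOk p.1 = true
instance (voices : List (String × String)) : Decidable (Pre_filter_most_recent_versions voices) := by
  unfold Pre_filter_most_recent_versions; infer_instance

def pvWitness_filter_most_recent_versions : (List (String × String)) :=
  [("emma-v1", "a"), ("emma-v2", "b"), ("liam", "c")]

def Spec_filter_most_recent_versions (voices : List (String × String)) (out : List (String × String)) : Prop := out = filter_most_recent_versions_alt voices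
instance (voices : List (String × String)) (out : List (String × String)) : Decidable (Spec_filter_most_recent_versions voices out) := by unfold Spec_filter_most_recent_versions; infer_instance

-- ===== CLAIM (what is proved, stated in full; the proofs are below) =====
def Claim_equal_filter_most_recent_versions : Prop := ∀ (voices : List (String × String)), Dom_filter_most_recent_versions voices → Pre_filter_most_recent_versions voices → Spec_filter_most_recent_versions voices (filter_most_recent_versions voices)

-- ===== LEMMAS AND PROOFS =====
def pvKey (p : String × String) : String := (pvParse p.1).1
def pvVer (p : String × String) : Int := (pvParse p.1).2
def pvVers (voices : List (String × String)) (k : String) : List Int :=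
  (voices.filter (fun p => pvKey p == k)).map pvVer
def pvMaxOf? (l : List Int) : Option Int :=
  match l with | [] => none | v :: t => some (t.foldl max v)
def pvPred (voices : List (String × String)) (p : String × String) : Bool :=
  pvVer p == (pvMaxOf? (pvVers voices (pvKey p))).getD 0

theorem pvMaxOf?_snoc (l : List Int) (v : Int) :
    pvMaxOf? (l ++ [v]) = some (match pvMaxOf? l with | none => v | some m => max m v) := by
  cases l with
  | nil => rfl
  | cons x t => simp [pvMaxOf?, List.foldl_append]

theorem pvVers_snoc (voices : List (String × String)) (p : String × String) (k : String) :
    pvVers (voices ++ [p]) k = pvVers voices k ++ (if pvKey p == k then [pvVer p] else []) := by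
  by_cases h : pvKey p == k <;> simp [pvVers, List.filter_append, h]

theorem pvBuildA_get (voices : List (String × String)) (k : String) :
    ((pvBuildA voices).get? k).map (·.1) = pvMaxOf? (pvVers voices k) := by
  induction voices using List.reverseRecOn with
  | nil => simp [pvBuildA, pvVers, pvMaxOf?, PySem.Dict.get?_empty]
  | append_singleton l p ih =>
    have hfold : pvBuildA (l ++ [p]) =
        (if (pvBuildA l).contains (pvParse p.1).1 = false then
          (pvBuildA l).insert (pvParse p.1).1 ((pvParse p.1).2, p.2)
        else if (pvParse p.1).2 > ((pvBuildA l).getD (pvParse p.1).1 (0, "")).1 then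
          (pvBuildA l).insert (pvParse p.1).1 ((pvParse p.1).2, p.2)
        else (pvBuildA l)) := by
      simp [pvBuildA, List.foldl_append]
    rw [hfold, pvVers_snoc]
    set D := pvBuildA l with hD
    by_cases hk : pvKey p = k
    · rw [if_pos (show (pvKey p == k) = true from by simp [hk]), pvMaxOf?_snoc]
      have hkk : (pvParse p.1).1 = k := hk
      by_cases hc : D.contains (pvParse p.1).1 = false
      · have hnone : D.get? k = none := by
          rw [PySem.Dict.get?_eq_none_iff_contains, ← hkk]; exact hc
        have hmn : pvMaxOf? (pvVers l k) = none := by rw [← ih, hnone]; rfl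
        rw [if_pos hc, hkk, PySem.Dict.get?_insert_self, hmn]
        simp [pvVer]
      · rw [if_neg hc]
        have hct : D.contains k = true := by
          rw [← hkk]; revert hc; cases D.contains (pvParse p.1).1 <;> simp
        obtain ⟨q, hq⟩ : ∃ q, D.get? k = some q := by
          rw [PySem.Dict.contains_eq_isSome_get?] at hct
          exact Option.isSome_iff_exists.mp hct
        have hm : pvMaxOf? (pvVers l k) = some q.1 := by rw [← ih, hq]; rfl
        have hgd : (D.getD (pvParse p.1).1 (0, "")).1 = q.1 := by
          rw [hkk, PySem.Dict.getD_eq_get?_getD, hq]; rfl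
        rw [hm]
        by_cases hgt : (pvParse p.1).2 > (D.getD (pvParse p.1).1 (0, "")).1
        · rw [if_pos hgt, hkk, PySem.Dict.get?_insert_self]
          rw [hgd] at hgt
          simp only [Option.map_some, Option.some.injEq, pvVer]
          exact (max_eq_right (le_of_lt hgt)).symm
        · rw [if_neg hgt, hq]
          rw [hgd] at hgt
          simp only [Option.map_some, Option.some.injEq, pvVer]
          exact (max_eq_left (not_lt.mp hgt)).symm
    · rw [if_neg (show ¬((pvKey p == k) = true) from by simp [hk]), List.append_nil]
      have hne : k ≠ (pvParse p.1).1 := fun h => hk h.symm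
      by_cases hc : D.contains (pvParse p.1).1 = false
      · rw [if_pos hc, PySem.Dict.get?_insert_of_ne _ _ hne]; exact ih
      · rw [if_neg hc]
        by_cases hgt : (pvParse p.1).2 > (D.getD (pvParse p.1).1 (0, "")).1
        · rw [if_pos hgt, PySem.Dict.get?_insert_of_ne _ _ hne]; exact ih
        · rw [if_neg hgt]; exact ih

theorem pvVers_ne_nil (voices : List (String × String)) (p : String × String) (hp : p ∈ voices) :
    pvVers voices (pvKey p) ≠ [] := by
  intro h
  have hmem : p ∈ voices.filter (fun q => pvKey q == pvKey p) := by
    simp [List.mem_filter, hp]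
  simp only [pvVers] at h
  rw [List.map_eq_nil_iff] at h
  rw [h] at hmem
  simp at hmem

theorem pvA_eq_filter (voices : List (String × String)) :
    filter_most_recent_versions voices = voices.filter (pvPred voices) := by
  show voices.foldl (fun acc p =>
      if (pvParse p.1).2 == ((pvBuildA voices).getD (pvParse p.1).1 (0, "")).1 then acc ++ [p]
      else acc) [] = _
  rw [show (fun acc (p : String × String) =>
      if (pvParse p.1).2 == ((pvBuildA voices).getD (pvParse p.1).1 (0, "")).1 then acc ++ [p]
      else acc) = (fun acc p =>
      if ((pvParse p.1).2 == ((pvBuildA voices).getD (pvParse p.1).1 (0, "")).1) = true then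
        acc ++ [(fun q => q) p] else acc) from rfl]
  rw [PySem.List.foldl_append_if]
  rw [List.nil_append, List.map_id']
  apply List.filter_congr
  intro p hp
  have h1 : ((pvBuildA voices).get? (pvKey p)).map (·.1) = pvMaxOf? (pvVers voices (pvKey p)) :=
    pvBuildA_get voices (pvKey p)
  obtain ⟨m, hm⟩ : ∃ m, pvMaxOf? (pvVers voices (pvKey p)) = some m := by
    cases hv : pvVers voices (pvKey p) with
    | nil => exact absurd hv (pvVers_ne_nil voices p hp)
    | cons a t => exact ⟨t.foldl max a, rfl⟩
  obtain ⟨q, hq⟩ : ∃ q, (pvBuildA voices).get? (pvKey p) = some q := by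
    cases hg : (pvBuildA voices).get? (pvKey p) with
    | none => rw [hg, hm] at h1; exact absurd h1 (by simp)
    | some q => exact ⟨q, rfl⟩
  have hq1 : q.1 = m := by
    rw [hq, hm] at h1; simpa using h1
  have hgd : ((pvBuildA voices).getD (pvParse p.1).1 (0, "")).1 = m := by
    rw [show (pvParse p.1).1 = pvKey p from rfl, PySem.Dict.getD_eq_get?_getD, hq]
    exact hq1
  rw [hgd]
  show ((pvParse p.1).2 == m) = pvPred voices p
  have hm' : pvMaxOf? (pvVers voices (pvParse p.1).1) = some m := hm
  simp [pvPred, pvVer, pvKey, hm']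

theorem pvEnum_fm {β : Type} (P : String × String → Bool) (G : String × String → β) :
    ∀ (xs : List (String × String)) (s : Int),
    ((PySem.List.enumerate xs s).filter (fun e => P e.2)).map (fun e => G e.2) = (xs.filter P).map G := by
  intro xs
  induction xs with
  | nil => intro s; simp [PySem.List.enumerate]
  | cons x t ih =>
    intro s
    rw [PySem.List.enumerate_cons]
    by_cases h : P x = true <;> simp [h, ih]

theorem pvPartition_perm {α : Type} (q P : α → Bool) :
    ∀ (E : List α),
    ((E.filter q).filter P ++ (E.filter (fun e => !q e)).filter P).Perm (E.filter P) := by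
  intro E
  induction E with
  | nil => simp
  | cons x t ih =>
    by_cases hq : q x = true <;> by_cases hP : P x = true <;>
      simp only [List.filter_cons, hq, hP, Bool.not_true, Bool.not_false, reduceIte]
    · exact ih.cons x
    · exact ih
    · exact (List.perm_middle).trans (ih.cons x)
    · exact ih

theorem pvFlat_perm {α κ : Type} [BEq κ] [LawfulBEq κ] (key : α → κ) (P : α → Bool) :
    ∀ (ks : List κ) (E : List α), ks.Nodup → (∀ e ∈ E, key e ∈ ks) →
    (ks.flatMap (fun k => (E.filter (fun e => key e == k)).filter P)).Perm (E.filter P) := by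
  intro ks
  induction ks with
  | nil =>
    intro E _ hcov
    have : E = [] := by
      cases E with
      | nil => rfl
      | cons x t => exact absurd (hcov x (by simp)) (by simp)
    simp [this]
  | cons k ks ih =>
    intro E hnd hcov
    have hk : k ∉ ks := (List.nodup_cons.mp hnd).1
    have hnd' : ks.Nodup := (List.nodup_cons.mp hnd).2
    have hsame : ∀ k' ∈ ks,
        ((E.filter (fun e => !(key e == k))).filter (fun e => key e == k')).filter P
          = (E.filter (fun e => key e == k')).filter P := by
      intro k' hk'
      rw [List.filter_filter, List.filter_filter, List.filter_filter]
      apply List.filter_congr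
      intro e _
      by_cases h : key e = k'
      · have hne : k' ≠ k := fun hkk => hk (hkk ▸ hk')
        have : (key e == k) = false := by simp [h, hne]
        simp [h, hne]
      · simp [h]
    have htail : ks.flatMap (fun k' => (E.filter (fun e => key e == k')).filter P)
        = ks.flatMap (fun k' => ((E.filter (fun e => !(key e == k))).filter (fun e => key e == k')).filter P) := by
      rw [List.flatMap, List.flatMap]
      exact congrArg List.flatten (List.map_congr_left (fun k' h => (hsame k' h).symm))
    have hcov' : ∀ e ∈ E.filter (fun e => !(key e == k)), key e ∈ ks := by
      intro e he
      rcases List.mem_filter.mp he with ⟨heE, hne⟩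
      rcases List.mem_cons.mp (hcov e heE) with h | h
      · simp [h] at hne
      · exact h
    rw [List.flatMap_cons, htail]
    exact ((ih _ hnd' hcov').append_left _).trans (pvPartition_perm (fun e => key e == k) P E)

theorem pvGroups_getD (voices : List (String × String)) (k : String) :
    (pvGroups voices).getD k [] =
      ((PySem.List.enumerate voices).filter (fun e => pvKey e.2 == k)).map (fun e => (pvEntry e).2) := by
  have h := PySem.Dict.getD_foldl_modify_append ((PySem.List.enumerate voices).map pvEntry)
    PySem.Dict.empty k
  rw [List.foldl_map] at h
  have h2 : (pvGroups voices).getD k [] =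
      (((PySem.List.enumerate voices).map pvEntry).filter (fun q => q.1 == k)).map (·.2) := by
    simpa [pvGroups, PySem.Dict.getD_empty] using h
  rw [h2, List.filter_map, List.map_map]
  rfl

theorem pvGroups_keys (voices : List (String × String)) :
    (pvGroups voices).keys = PySem.Set.ofList ((PySem.List.enumerate voices).map (fun e => pvKey e.2)) := by
  have h := PySem.Dict.keys_foldl_modify_key (PySem.List.enumerate voices)
    (fun e => (pvEntry e).1) [] (fun _ e => (· ++ [(pvEntry e).2])) PySem.Dict.empty
  have h2 : (pvGroups voices).keys
      = PySem.Set.update (PySem.Dict.empty :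
          PySem.Dict String (List (Int × Int × String × String))).keys
          ((PySem.List.enumerate voices).map (fun e => (pvEntry e).1)) := by
    simpa [pvGroups] using h
  rw [h2, PySem.Dict.keys_empty]
  rfl

theorem pvGroups_keys_nodup (voices : List (String × String)) : (pvGroups voices).keys.Nodup := by
  have h := PySem.Dict.nodup_keys_foldl_modify_key (PySem.List.enumerate voices)
    (fun e => (pvEntry e).1) [] (fun _ e => (· ++ [(pvEntry e).2])) PySem.Dict.empty
    (by simp [PySem.Dict.keys_empty])
  simpa [pvGroups] using h

set_option maxHeartbeats 1000000 in

set_option maxHeartbeats 1000000 in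
theorem pvB_eq_filter (voices : List (String × String)) :
    filter_most_recent_versions_alt voices = voices.filter (pvPred voices) := by
  have hnd : (pvGroups voices).keys.Nodup := pvGroups_keys_nodup voices
  have hcov : ∀ e ∈ PySem.List.enumerate voices, pvKey e.2 ∈ (pvGroups voices).keys := by
    intro e he
    rw [pvGroups_keys, PySem.Set.mem_ofList]
    exact List.mem_map_of_mem he
  -- the body of B's second loop, as a function of the key
  have hvals : (pvGroups voices).values
      = (pvGroups voices).keys.map (fun k => (pvGroups voices).getD k []) :=
    PySem.Dict.values_eq_map_keys _ hnd []
  have hresults : (pvGroups voices).values.foldl (fun acc members =>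
      acc ++ (match PySem.List.max? (members.map (fun t => t.2.1)) (fun v => v) with
              | some m => members.filter (fun t => t.2.1 == m)
              | none => [])) []
      = (pvGroups voices).keys.flatMap (fun k =>
          (match PySem.List.max? (((pvGroups voices).getD k []).map (fun t => t.2.1)) (fun v => v) with
           | some m => ((pvGroups voices).getD k []).filter (fun t => t.2.1 == m)
           | none => [])) := by
    rw [hvals, List.foldl_map, PySem.List.foldl_append_eq_flatMap]
    rfl
  -- each key's chunk is the group's max-version members
  have hchunk : ∀ k ∈ (pvGroups voices).keys,
      (match PySem.List.max? (((pvGroups voices).getD k []).map (fun t => t.2.1)) (fun v => v) with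
       | some m => ((pvGroups voices).getD k []).filter (fun t => t.2.1 == m)
       | none => [])
      = (((PySem.List.enumerate voices).filter (fun e => pvKey e.2 == k)).filter
          (fun e => pvPred voices e.2)).map (fun e => (pvEntry e).2) := by
    intro k hk
    -- the group's version list is pvVers voices k, and it is nonempty
    have hmapver : ((pvGroups voices).getD k []).map (fun t => t.2.1) = pvVers voices k := by
      rw [pvGroups_getD, List.map_map]
      have := pvEnum_fm (fun p => pvKey p == k) pvVer voices 0
      calc ((PySem.List.enumerate voices).filter (fun e => pvKey e.2 == k)).map
              ((fun t => t.2.1) ∘ (fun e => (pvEntry e).2))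
          = ((PySem.List.enumerate voices).filter (fun e => pvKey e.2 == k)).map
              (fun e => pvVer e.2) := rfl
        _ = pvVers voices k := this
    obtain ⟨e, he, hke⟩ : ∃ e ∈ PySem.List.enumerate voices, pvKey e.2 = k := by
      rw [pvGroups_keys, PySem.Set.mem_ofList] at hk
      simpa using hk
    have hp2 : e.2 ∈ voices := by
      have := List.mem_map_of_mem (f := fun q => q.2) he
      rwa [PySem.List.map_snd_enumerate] at this
    obtain ⟨a, ts, hvat⟩ : ∃ a ts, pvVers voices k = a :: ts := by
      cases hv : pvVers voices k with
      | nil => rw [← hke] at hv; exact absurd hv (pvVers_ne_nil voices e.2 hp2)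
      | cons a ts => exact ⟨a, ts, rfl⟩
    rw [hmapver, hvat, PySem.List.max?_id_cons, pvGroups_getD]
    have hm : (pvMaxOf? (pvVers voices k)).getD 0 = ts.foldl max a := by rw [hvat]; rfl
    show (((PySem.List.enumerate voices).filter (fun e => pvKey e.2 == k)).map
        (fun e => (pvEntry e).2)).filter (fun t => t.2.1 == ts.foldl max a) = _
    rw [List.filter_map]
    congr 1
    rw [List.filter_filter,
        show (List.filter (fun e => pvPred voices e.2)
            (List.filter (fun e => pvKey e.2 == k) (PySem.List.enumerate voices)))
          = List.filter (fun e => pvPred voices e.2 && (pvKey e.2 == k))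
              (PySem.List.enumerate voices) from List.filter_filter]
    apply List.filter_congr
    intro e' _
    by_cases hk' : pvKey e'.2 = k
    · show (((pvEntry e').2.2.1 == ts.foldl max a) && (pvKey e'.2 == k))
          = (pvPred voices e'.2 && (pvKey e'.2 == k))
      have h1 : ((pvEntry e').2.2.1 : Int) = pvVer e'.2 := rfl
      have h2 : pvPred voices e'.2 = (pvVer e'.2 == ts.foldl max a) := by
        simp only [pvPred, hk', hm]
      rw [h1, h2]
    · show (((pvEntry e').2.2.1 == ts.foldl max a) && (pvKey e'.2 == k))
          = (pvPred voices e'.2 && (pvKey e'.2 == k))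
      have h3 : (pvKey e'.2 == k) = false := by simp [hk']
      rw [h3, Bool.and_false, Bool.and_false]
  have hflat : (pvGroups voices).keys.flatMap (fun k =>
      (match PySem.List.max? (((pvGroups voices).getD k []).map (fun t => t.2.1)) (fun v => v) with
       | some m => ((pvGroups voices).getD k []).filter (fun t => t.2.1 == m)
       | none => []))
      = ((pvGroups voices).keys.flatMap (fun k =>
          ((PySem.List.enumerate voices).filter (fun e => pvKey e.2 == k)).filter
            (fun e => pvPred voices e.2))).map (fun e => (pvEntry e).2) := by
    rw [List.map_flatMap]
    rw [List.flatMap, List.flatMap]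
    exact congrArg List.flatten (List.map_congr_left hchunk)
  -- permutation with the order-preserving filter of the enumeration
  have hperm : (((pvGroups voices).keys.flatMap (fun k =>
      ((PySem.List.enumerate voices).filter (fun e => pvKey e.2 == k)).filter
        (fun e => pvPred voices e.2))).map (fun e => (pvEntry e).2)).Perm
      (((PySem.List.enumerate voices).filter (fun e => pvPred voices e.2)).map
        (fun e => (pvEntry e).2)) := by
    apply List.Perm.map
    apply pvFlat_perm
    · exact hnd
    · exact hcov
  have hpw : (((PySem.List.enumerate voices).filter (fun e => pvPred voices e.2)).map
      (fun e => (pvEntry e).2)).Pairwise (fun a b => a.1 < b.1) := by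
    rw [List.pairwise_map]
    exact ((PySem.List.pairwise_lt_enumerate voices 0).filter _).imp (fun h => h)
  have hB : filter_most_recent_versions_alt voices
      = (PySem.List.sorted ((pvGroups voices).values.foldl (fun acc members =>
          acc ++ (match PySem.List.max? (members.map (fun t => t.2.1)) (fun v => v) with
                  | some m => members.filter (fun t => t.2.1 == m)
                  | none => [])) []) (fun t => t.1)).map (fun t => t.2.2) := rfl
  rw [hB, hresults, hflat]
  rw [PySem.List.sorted_eq_of_perm_of_pairwise_lt _ _ _ hperm.symm hpw]
  rw [List.map_map]
  have hfin := pvEnum_fm (pvPred voices) (fun p => p) voices 0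
  calc (((PySem.List.enumerate voices).filter (fun e => pvPred voices e.2)).map
          ((fun t => t.2.2) ∘ (fun e => (pvEntry e).2)))
      = (((PySem.List.enumerate voices).filter (fun e => pvPred voices e.2)).map
          (fun e => (fun p => p) e.2)) := rfl
    _ = voices.filter (pvPred voices) := by rw [hfin, List.map_id']

-- ===== VERDICT (by name: the statement is the Claim_ definition above) =====
theorem filter_most_recent_versions_spec : Claim_equal_filter_most_recent_versions := by
  intro voices _ _
  unfold Spec_filter_most_recent_versions
  rw [pvA_eq_filter, pvB_eq_filter]
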